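-- pv_equiv track=rewrite | github.com/NATIJAH/CodeSprout | windows/flutter/Streamlit/Lab2-Nurul_Syasyawafa.py | get_atom_element
-- ===== SOURCE A (Python) =====
-- ATOMIC_MASSES = {
--     'H': 1.008,
--     'C': 12.001,
--     'N': 14.007,
--     'O': 15.999,
--     'P': 30.974,
--     'S': 32.06
-- }
--
-- def get_atom_element(atom_name: str) -> str:
--     name = atom_name.strip()
--
--     if not name:
--         return 'C'
--
--     letters = ''.join([c for c in name if c.isalpha()]).upper()
--
--     if len(letters) >= 2 and letters[:2] in ATOMIC_MASSES:
--         return letters[:2]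
--
--     return letters[0] if letters else 'C'
-- ===== SOURCE B (Python) =====
-- def get_atom_element(atom_name: str) -> str:
--     # Same result as A: the two-letter dict branch in A is dead (all keys are
--     # single characters), so the answer is the uppercased first alphabetic
--     # character, or 'C' if there is none. One early-exit pass, no containers.
--     for c in atom_name:
--         if c.isalpha():
--             return c.upper()
--     return 'C'
-- ===== Notes on version B (the rewrite author's own statement) =====
-- stated objective: simpler
-- what changed: A strips, materializes the full filtered-and-uppercased letter string and consults a dead two-letter dictionary branch; B is a single early-exit scan that returns the uppercase of the first alphabetic character (or 'C'), building nothing.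
import Mathlib
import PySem

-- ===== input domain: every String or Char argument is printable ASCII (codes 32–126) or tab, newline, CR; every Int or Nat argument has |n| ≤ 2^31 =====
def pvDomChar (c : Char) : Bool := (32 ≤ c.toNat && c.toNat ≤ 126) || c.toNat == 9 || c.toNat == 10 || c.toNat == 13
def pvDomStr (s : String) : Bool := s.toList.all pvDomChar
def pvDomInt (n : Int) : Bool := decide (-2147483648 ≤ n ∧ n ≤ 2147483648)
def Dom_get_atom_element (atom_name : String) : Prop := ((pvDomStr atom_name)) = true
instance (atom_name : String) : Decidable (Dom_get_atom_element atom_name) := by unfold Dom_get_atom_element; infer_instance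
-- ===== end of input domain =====

-- B replaces A's strip + filtered-string build + dead two-letter dictionary branch by a
-- single early-exit scan returning the uppercase of the first alphabetic character ('C' if none).


-- ===== PORT A =====
-- the dict's float values are never used by the function; only key membership matters,
-- so ATOMIC_MASSES is ported as its key list (in insertion order)
def pvAtomicMassKeys : List String := ["H", "C", "N", "O", "P", "S"]

def get_atom_element (atom_name : String) : String :=
  let name := PySem.Str.strip atom_name
  if name = "" then "C"
  else
    let letters := PySem.Str.upper (String.ofList (name.toList.filter PySem.Chars.isalpha))
    if 2 ≤ PySem.Str.len letters ∧ PySem.Str.slice letters none (some 2) ∈ pvAtomicMassKeys then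
      PySem.Str.slice letters none (some 2)
    else
      if letters = "" then "C"
      else
        match PySem.Str.pyGet? letters 0 with
        | some c => String.ofList [c]
        | none => "C"   -- unreachable: letters ≠ ""

-- ===== PORT B =====
def pvFirstAlpha : List Char → String
  | [] => "C"
  | c :: rest =>
    if PySem.Chars.isalpha c then String.ofList [PySem.Chars.upperChar c]
    else pvFirstAlpha rest

def get_atom_element_alt (atom_name : String) : String :=
  pvFirstAlpha atom_name.toList

-- ===== PRECONDITION & SPEC =====
def Spec_get_atom_element (atom_name : String) (out : String) : Prop := out = get_atom_element_alt atom_name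
instance (atom_name : String) (out : String) : Decidable (Spec_get_atom_element atom_name out) := by unfold Spec_get_atom_element; infer_instance

-- ===== CLAIM (what is proved, stated in full; the proofs are below) =====
def Claim_equal_get_atom_element : Prop := ∀ (atom_name : String), Dom_get_atom_element atom_name → Spec_get_atom_element atom_name (get_atom_element atom_name)

-- ===== LEMMAS AND PROOFS =====

theorem pv_isspace_not_isalpha (c : Char) (h : PySem.Chars.isspace c = true) :
    PySem.Chars.isalpha c = false := by
  simp only [PySem.Chars.isspace, Char.toNat] at h
  simp only [PySem.Chars.isalpha, PySem.Chars.isupper, PySem.Chars.islower, Char.le_def,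
    UInt32.le_iff_toNat_le, Bool.or_eq_false_iff,
    Bool.and_eq_false_iff, decide_eq_false_iff_not, not_le] at h ⊢
  simp only [Bool.or_eq_true, Bool.and_eq_true, decide_eq_true_eq] at h
  simp only [show ('A' : Char).val.toNat = 65 from rfl, show ('Z' : Char).val.toNat = 90 from rfl,
    show ('a' : Char).val.toNat = 97 from rfl, show ('z' : Char).val.toNat = 122 from rfl]
  omega

theorem pv_filter_dropWhile (l : List Char) :
    (l.dropWhile PySem.Chars.isspace).filter PySem.Chars.isalpha
      = l.filter PySem.Chars.isalpha := by
  induction l with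
  | nil => rfl
  | cons c rest ih =>
    by_cases h : PySem.Chars.isspace c = true
    · simp [List.dropWhile, List.filter, h, pv_isspace_not_isalpha c h, ih]
    · simp [List.dropWhile, h]

theorem pv_filter_strip (l : List Char) :
    (PySem.Chars.strip l).filter PySem.Chars.isalpha = l.filter PySem.Chars.isalpha := by
  unfold PySem.Chars.strip PySem.Chars.rstrip PySem.Chars.lstrip
  rw [List.filter_reverse, pv_filter_dropWhile, List.filter_reverse, List.reverse_reverse,
    pv_filter_dropWhile]

theorem pv_two_not_mem (c1 c2 : Char) :
    String.ofList [c1, c2] ∉ pvAtomicMassKeys := by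
  intro h
  simp only [pvAtomicMassKeys, List.mem_cons, List.not_mem_nil, or_false] at h
  rcases h with h | h | h | h | h | h <;>
    · have := congrArg (fun t => t.toList.length) h
      simp at this

theorem pv_firstAlpha_filter (l : List Char) :
    pvFirstAlpha l =
      match l.filter PySem.Chars.isalpha with
      | [] => "C"
      | c :: _ => String.ofList [PySem.Chars.upperChar c] := by
  induction l with
  | nil => rfl
  | cons c rest ih =>
    by_cases h : PySem.Chars.isalpha c = true
    · simp [pvFirstAlpha, List.filter, h]
    · simp [pvFirstAlpha, List.filter, h, ih]

theorem pv_A_eq (s : String) :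
    get_atom_element s =
      match s.toList.filter PySem.Chars.isalpha with
      | [] => "C"
      | c :: _ => String.ofList [PySem.Chars.upperChar c] := by
  unfold get_atom_element
  have hstrip : (PySem.Str.strip s).toList = PySem.Chars.strip s.toList :=
    PySem.Str.toList_strip s
  have hfilter : (PySem.Str.strip s).toList.filter PySem.Chars.isalpha
      = s.toList.filter PySem.Chars.isalpha := by
    rw [hstrip, pv_filter_strip]
  by_cases hempty : PySem.Str.strip s = ""
  · -- stripped string empty ⇒ no alpha chars at all
    have : s.toList.filter PySem.Chars.isalpha = [] := by
      rw [← hfilter, hempty]; rfl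
    simp [hempty, this]
  · simp only [if_neg hempty]
    set letters := PySem.Str.upper (String.ofList ((PySem.Str.strip s).toList.filter PySem.Chars.isalpha)) with hl
    have hlt : letters.toList
        = (s.toList.filter PySem.Chars.isalpha).map PySem.Chars.upperChar := by
      rw [hl, PySem.Str.toList_upper]
      simp [PySem.Chars.upper]
      rw [pv_filter_strip]
    cases hc : s.toList.filter PySem.Chars.isalpha with
    | nil =>
      have h0 : letters = "" := by
        have := hlt; rw [hc] at this; simp at this
        exact String.ext (by simp [this])
      have hcond : ¬ (2 ≤ PySem.Str.len letters ∧
          PySem.Str.slice letters none (some 2) ∈ pvAtomicMassKeys) := by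
        rintro ⟨h2, -⟩
        rw [h0] at h2
        simp [PySem.Str.len] at h2
      simp [h0]
    | cons c rest =>
      have hlt' : letters.toList = PySem.Chars.upperChar c :: rest.map PySem.Chars.upperChar := by
        rw [hlt, hc]; simp
      have hcond : ¬ (2 ≤ PySem.Str.len letters ∧
          PySem.Str.slice letters none (some 2) ∈ pvAtomicMassKeys) := by
        rintro ⟨h2, hmem⟩
        -- letters has ≥ 2 chars, so its 2-slice is a 2-char string: never a key
        simp [PySem.Str.len, hlt'] at h2
        cases hr : rest.map PySem.Chars.upperChar with
        | nil => simp at hr; subst hr; norm_num at h2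
        | cons c2 tail =>
          have hslice : PySem.Str.slice letters none (some 2)
              = String.ofList [PySem.Chars.upperChar c, c2] := by
            apply String.ext
            rw [PySem.Str.toList_slice]
            simp [hlt', hr, PySem.Chars.slice_eq_listSlice]
            rw [show ((2:Int) = ((2:Nat) : Int)) by rfl, PySem.List.slice_to]
            · simp
            · decide
          rw [hslice] at hmem
          exact pv_two_not_mem _ _ hmem
      have hne : letters ≠ "" := by
        intro h; rw [h] at hlt'; simp at hlt'
      have hget : PySem.Str.pyGet? letters 0 = some (PySem.Chars.upperChar c) := by
        simp [PySem.Str.pyGet?, hlt', PySem.Chars.pyGet?_eq_listPyGet?, PySem.List.pyGet?, PySem.List.pyIdx?]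
      rw [if_neg hcond, if_neg hne, hget]

-- ===== VERDICT (by name: the statement is the Claim_ definition above) =====
theorem get_atom_element_spec : Claim_equal_get_atom_element := by
  intro s _
  unfold Spec_get_atom_element get_atom_element_alt
  rw [pv_A_eq, pv_firstAlpha_filter]
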